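-- pv_equiv track=rewrite | github.com/throwaway670/boot | aes.py | _build_inv_sbox
-- ===== SOURCE A (Python) =====
-- def _build_inv_sbox(S):
--     inv = [0] * 256
--     seen = [False] * 256
--     for i, v in enumerate(S):
--         v &= 0xFF
--         if not seen[v]:
--             inv[v] = i
--             seen[v] = True
--     # fill unmapped values with identity to keep it total (in case SBOX is not a permutation)
--     for y in range(256):
--         if not seen[y]:
--             inv[y] = y
--     return inv
-- ===== SOURCE B (Python) =====
-- def _build_inv_sbox(S):
--     # Identity default, then write entries in reverse index order so the
--     # first occurrence of each masked value wins; no seen bitmap, no fill pass.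
--     inv = list(range(256))
--     for i, v in reversed(list(enumerate(S))):
--         inv[v & 0xFF] = i
--     return inv
-- ===== Notes on version B (the rewrite author's own statement) =====
-- stated objective: simpler
-- what changed: Replaces the seen-bitmap guard and the separate identity fill pass by a single unconditional reverse-order overwrite into an identity-initialized table (last write = smallest index = first occurrence).
import Mathlib
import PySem

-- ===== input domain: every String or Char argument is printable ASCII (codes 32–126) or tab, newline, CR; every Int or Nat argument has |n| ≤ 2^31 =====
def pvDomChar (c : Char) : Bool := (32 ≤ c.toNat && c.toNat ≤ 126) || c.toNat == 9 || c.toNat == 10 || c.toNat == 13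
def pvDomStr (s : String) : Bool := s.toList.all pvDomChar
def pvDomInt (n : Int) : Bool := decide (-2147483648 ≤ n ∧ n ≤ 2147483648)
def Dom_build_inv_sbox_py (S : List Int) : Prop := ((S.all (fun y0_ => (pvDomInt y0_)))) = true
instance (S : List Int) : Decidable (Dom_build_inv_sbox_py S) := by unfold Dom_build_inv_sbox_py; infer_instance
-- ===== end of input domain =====

-- B replaces A's seen-bitmap guard and separate identity fill pass by one unconditional
-- reverse-order overwrite into an identity-initialized table (objective: simpler).


-- ===== PORT A =====
-- v & 0xFF, as a Nat index (always in 0..255, so plain List.set/getD are exact here)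
def pvMask (v : Int) : Nat := (PySem.Int.band v 255).toNat

-- loop body of A's first pass: 'v &= 0xFF; if not seen[v]: inv[v] = i; seen[v] = True'
def pvStepA (st : List Int × List Bool) (p : Int × Int) : List Int × List Bool :=
  if st.2.getD (pvMask p.2) false = false
  then (st.1.set (pvMask p.2) p.1, st.2.set (pvMask p.2) true) else st

-- loop body of A's second pass: 'if not seen[y]: inv[y] = y'
def pvFillA (seen : List Bool) (inv : List Int) (y : Nat) : List Int :=
  if seen.getD y false = false then inv.set y (y : Int) else inv

def build_inv_sbox_py (S : List Int) : List Int :=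
  -- inv = [0] * 256 ; seen = [False] * 256 ; for i, v in enumerate(S): …
  let st := (PySem.List.enumerate S 0).foldl pvStepA
    (List.replicate 256 (0 : Int), List.replicate 256 false)
  -- for y in range(256): …   (range(256) ported as List.range 256; exact)
  (List.range 256).foldl (pvFillA st.2) st.1

-- ===== PORT B =====
-- loop body of B: 'inv[v & 0xFF] = i'
def pvStepB (inv : List Int) (p : Int × Int) : List Int := inv.set (pvMask p.2) p.1

def build_inv_sbox_py_alt (S : List Int) : List Int :=
  -- inv = list(range(256)) ; for i, v in reversed(list(enumerate(S))): inv[v & 0xFF] = i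
  ((PySem.List.enumerate S 0).reverse).foldl pvStepB ((List.range 256).map Int.ofNat)

-- ===== PRECONDITION & SPEC =====
def Spec_build_inv_sbox_py (S : List Int) (out : List Int) : Prop := out = build_inv_sbox_py_alt S
instance (S : List Int) (out : List Int) : Decidable (Spec_build_inv_sbox_py S out) := by unfold Spec_build_inv_sbox_py; infer_instance

-- ===== CLAIM (what is proved, stated in full; the proofs are below) =====
def Claim_equal_build_inv_sbox_py : Prop := ∀ (S : List Int), Dom_build_inv_sbox_py S → Spec_build_inv_sbox_py S (build_inv_sbox_py S)

-- ===== LEMMAS AND PROOFS =====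

-- index of the first element of S whose masked value is y, counting from i (shared characterisation)
def pvFirst (S : List Int) (i : Int) (y : Nat) : Option Int :=
  match S with
  | [] => none
  | v :: t => if pvMask v = y then some i else pvFirst t (i + 1) y

theorem getD_set_eq (xs : List Int) (n : Nat) (v d : Int) (h : n < xs.length) :
    (xs.set n v).getD n d = v := by
  simp [List.getD_eq_getElem?_getD, h]

theorem getD_set_ne (xs : List Int) (n m : Nat) (v d : Int) (h : n ≠ m) :
    (xs.set n v).getD m d = xs.getD m d := by
  simp [List.getD_eq_getElem?_getD, h]

theorem getD_set_eq_bool (xs : List Bool) (n : Nat) (v d : Bool) (h : n < xs.length) :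
    (xs.set n v).getD n d = v := by
  simp [List.getD_eq_getElem?_getD, h]

theorem getD_set_ne_bool (xs : List Bool) (n m : Nat) (v d : Bool) (h : n ≠ m) :
    (xs.set n v).getD m d = xs.getD m d := by
  simp [List.getD_eq_getElem?_getD, h]

-- ===== B-side characterisation =====
theorem B_foldr_length (L : List (Int × Int)) (inv : List Int) :
    (L.foldr (fun p inv => pvStepB inv p) inv).length = inv.length := by
  induction L generalizing inv with
  | nil => rfl
  | cons p t ih =>
    rw [List.foldr_cons]
    show (pvStepB (List.foldr (fun p inv => pvStepB inv p) inv t) p).length = inv.length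
    unfold pvStepB
    rw [List.length_set]
    exact ih inv

theorem B_foldr_getD (S : List Int) (i : Int) (inv : List Int) (hlen : inv.length = 256)
    (y : Nat) (hy : y < 256) (d : Int) :
    ((PySem.List.enumerate S i).foldr (fun p inv => pvStepB inv p) inv).getD y d =
      match pvFirst S i y with
      | some j => j
      | none => inv.getD y d := by
  induction S generalizing i with
  | nil => simp [PySem.List.enumerate_nil, pvFirst]
  | cons v t ih =>
    rw [PySem.List.enumerate_cons, List.foldr_cons]
    have hl := B_foldr_length (PySem.List.enumerate t (i + 1)) inv
    simp only [pvStepB] at ih hl ⊢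
    by_cases hm : pvMask v = y
    · rw [pvFirst, if_pos hm, hm]
      exact getD_set_eq _ y i d (by rw [hl, hlen]; exact hy)
    · rw [pvFirst, if_neg hm, getD_set_ne _ _ _ _ _ hm]
      exact ih (i + 1)

-- ===== A-side characterisation =====
theorem A1_len1 (L : List (Int × Int)) (st : List Int × List Bool) :
    (L.foldl pvStepA st).1.length = st.1.length := by
  induction L generalizing st with
  | nil => rfl
  | cons p t ih =>
    rw [List.foldl_cons, ih]
    unfold pvStepA
    split <;> simp

theorem A1_seen (S : List Int) (i : Int) (inv : List Int) (seen : List Bool)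
    (hs : seen.length = 256) (y : Nat) (hy : y < 256) :
    ((PySem.List.enumerate S i).foldl pvStepA (inv, seen)).2.getD y false
      = (seen.getD y false || (pvFirst S i y).isSome) := by
  induction S generalizing i inv seen with
  | nil => simp [PySem.List.enumerate_nil, pvFirst]
  | cons v t ih =>
    rw [PySem.List.enumerate_cons, List.foldl_cons]
    by_cases h : seen.getD (pvMask v) false = false
    · rw [show pvStepA (inv, seen) (i, v)
            = (inv.set (pvMask v) i, seen.set (pvMask v) true) from by
          unfold pvStepA; simp only []; rw [if_pos h]]
      rw [ih (i + 1) (inv.set (pvMask v) i) (seen.set (pvMask v) true)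
            (by rw [List.length_set]; exact hs)]
      by_cases hm : pvMask v = y
      · subst hm
        rw [getD_set_eq_bool seen _ true false (by rw [hs]; exact hy), h, pvFirst]
        simp
      · rw [getD_set_ne_bool seen _ _ true false hm, pvFirst, if_neg hm]
    · rw [show pvStepA (inv, seen) (i, v) = (inv, seen) from by
          unfold pvStepA; simp only []; rw [if_neg h]]
      rw [ih (i + 1) inv seen hs]
      simp only [Bool.not_eq_false] at h
      by_cases hm : pvMask v = y
      · subst hm
        rw [h]
        simp
      · rw [pvFirst, if_neg hm]

theorem A1_inv (S : List Int) (i : Int) (inv : List Int) (seen : List Bool)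
    (hi : inv.length = 256) (hs : seen.length = 256) (y : Nat) (hy : y < 256) (d : Int) :
    ((PySem.List.enumerate S i).foldl pvStepA (inv, seen)).1.getD y d
      = (if seen.getD y false = true then inv.getD y d
         else match pvFirst S i y with
              | some j => j
              | none => inv.getD y d) := by
  induction S generalizing i inv seen with
  | nil =>
    rw [PySem.List.enumerate_nil]
    cases hse : seen.getD y false <;> simp [pvFirst]
  | cons v t ih =>
    rw [PySem.List.enumerate_cons, List.foldl_cons]
    by_cases h : seen.getD (pvMask v) false = false
    · rw [show pvStepA (inv, seen) (i, v)
            = (inv.set (pvMask v) i, seen.set (pvMask v) true) from by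
          unfold pvStepA; simp only []; rw [if_pos h]]
      rw [ih (i + 1) (inv.set (pvMask v) i) (seen.set (pvMask v) true)
            (by rw [List.length_set]; exact hi) (by rw [List.length_set]; exact hs)]
      by_cases hm : pvMask v = y
      · subst hm
        rw [getD_set_eq_bool seen _ true false (by rw [hs]; exact hy), h,
            getD_set_eq inv _ i d (by rw [hi]; exact hy), pvFirst]
        simp
      · rw [getD_set_ne_bool seen _ _ true false hm, getD_set_ne inv _ _ i d hm,
            pvFirst, if_neg hm]
    · rw [show pvStepA (inv, seen) (i, v) = (inv, seen) from by
          unfold pvStepA; simp only []; rw [if_neg h]]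
      rw [ih (i + 1) inv seen hi hs]
      simp only [Bool.not_eq_false] at h
      by_cases hm : pvMask v = y
      · subst hm
        rw [h]
        simp
      · rw [pvFirst, if_neg hm]

theorem A2_length (L : List Nat) (seen : List Bool) (inv : List Int) :
    (L.foldl (pvFillA seen) inv).length = inv.length := by
  induction L generalizing inv with
  | nil => rfl
  | cons a t ih =>
    rw [List.foldl_cons, ih]
    unfold pvFillA
    split <;> simp

theorem A2_getD (L : List Nat) (seen : List Bool) (inv : List Int)
    (hb : ∀ a ∈ L, a < inv.length) (y : Nat) (d : Int) :
    (L.foldl (pvFillA seen) inv).getD y d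
      = (if y ∈ L ∧ seen.getD y false = false then (y : Int) else inv.getD y d) := by
  induction L generalizing inv with
  | nil => simp
  | cons a t ih =>
    rw [List.foldl_cons]
    by_cases h : seen.getD a false = false
    · rw [show pvFillA seen inv a = inv.set a (a : Int) from by
          unfold pvFillA; rw [if_pos h]]
      rw [ih (inv.set a (a : Int))
            (fun b hbm => by rw [List.length_set]; exact hb b (List.mem_cons_of_mem a hbm))]
      by_cases hy : y = a
      · subst hy
        rw [getD_set_eq inv y _ d (hb y List.mem_cons_self), ite_self,
            if_pos (show y ∈ y :: t ∧ seen.getD y false = false from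
              ⟨List.mem_cons_self, h⟩)]
      · rw [getD_set_ne inv a y _ d (fun e => hy e.symm)]
        simp [List.mem_cons, hy]
    · rw [show pvFillA seen inv a = inv from by unfold pvFillA; rw [if_neg h]]
      rw [ih inv (fun b hbm => hb b (List.mem_cons_of_mem a hbm))]
      simp only [Bool.not_eq_false] at h
      by_cases hy : y = a
      · subst hy
        have hc : ¬ (seen.getD y false = false) := by rw [h]; simp
        rw [if_neg (fun hx => hc hx.2), if_neg (fun hx => hc hx.2)]
      · simp [List.mem_cons, hy]

theorem getD_replicate_false (y : Nat) (hy : y < 256) :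
    (List.replicate 256 false).getD y false = false := by
  have hlt : y < (List.replicate 256 false).length := by
    rw [List.length_replicate]; exact hy
  rw [List.getD_eq_getElem _ _ hlt, List.getElem_replicate]

theorem getD_range_map (y : Nat) (hy : y < 256) (d : Int) :
    (((List.range 256).map Int.ofNat)).getD y d = (y : Int) := by
  have hlt : y < ((List.range 256).map Int.ofNat).length := by
    rw [List.length_map, List.length_range]; exact hy
  rw [List.getD_eq_getElem _ _ hlt, List.getElem_map, List.getElem_range]
  rfl

-- ===== VERDICT (by name: the statement is the Claim_ definition above) =====
theorem build_inv_sbox_py_spec : Claim_equal_build_inv_sbox_py := by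
  intro S _
  unfold Spec_build_inv_sbox_py
  have hAlen : (build_inv_sbox_py S).length = 256 := by
    unfold build_inv_sbox_py
    rw [A2_length, A1_len1, List.length_replicate]
  have hBlen : (build_inv_sbox_py_alt S).length = 256 := by
    unfold build_inv_sbox_py_alt
    rw [List.foldl_reverse, B_foldr_length, List.length_map, List.length_range]
  have hA : ∀ (y : Nat), y < 256 → (build_inv_sbox_py S).getD y 0
      = (match pvFirst S 0 y with | some j => j | none => (y : Int)) := by
    intro y hy
    unfold build_inv_sbox_py
    rw [A2_getD _ _ _ (fun a ha => by
        rw [A1_len1, List.length_replicate]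
        exact List.mem_range.mp ha)]
    rw [A1_seen S 0 _ _ (by rw [List.length_replicate]) y hy]
    rw [A1_inv S 0 _ _ (by rw [List.length_replicate]) (by rw [List.length_replicate]) y hy 0]
    rw [getD_replicate_false y hy]
    rw [Bool.false_or, if_neg (show ¬(false = true) by decide)]
    cases hf : pvFirst S 0 y with
    | some j =>
      rw [if_neg (fun hx => by simp at hx)]
    | none =>
      rw [if_pos ⟨List.mem_range.mpr hy, rfl⟩]
  have hB : ∀ (y : Nat), y < 256 → (build_inv_sbox_py_alt S).getD y 0
      = (match pvFirst S 0 y with | some j => j | none => (y : Int)) := by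
    intro y hy
    unfold build_inv_sbox_py_alt
    rw [List.foldl_reverse]
    rw [B_foldr_getD S 0 _ (by rw [List.length_map, List.length_range]) y hy 0]
    cases hf : pvFirst S 0 y with
    | some j => rfl
    | none => exact getD_range_map y hy 0
  apply List.ext_getElem (by rw [hAlen, hBlen])
  intro y h1 h2
  have hy : y < 256 := by rw [hAlen] at h1; exact h1
  have e1 : (build_inv_sbox_py S)[y] = (build_inv_sbox_py S).getD y 0 := by
    rw [List.getD_eq_getElem _ _ h1]
  have e2 : (build_inv_sbox_py_alt S)[y] = (build_inv_sbox_py_alt S).getD y 0 := by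
    rw [List.getD_eq_getElem _ _ h2]
  rw [e1, e2, hA y hy, hB y hy]
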